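-- pv_equiv track=rewrite | github.com/hmxmilohax/rock-band-3-deluxe | dependencies/python/midi_update_compare.py | compare_tracks
-- ===== SOURCE A (Python) =====
-- from collections import defaultdict
--
-- def group_events_by_time_window(events, time_window):
--     grouped_events = defaultdict(list)
--     for time, notes in events.items():
--         grouped_time = min(grouped_events.keys(), key=lambda t: abs(t - time) if abs(t - time) <= time_window else float('inf'), default=time)
--         if abs(grouped_time - time) <= time_window:
--             grouped_events[grouped_time].extend(notes)
--         else:
--             grouped_events[time].extend(notes)
--     return grouped_events
--
-- def compare_tracks(track1_events, track2_events, time_window, time_threshold):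
--     differences = []
--
--     grouped_track1 = group_events_by_time_window(track1_events, time_window)
--     grouped_track2 = group_events_by_time_window(track2_events, time_window)
--
--     all_times = sorted(set(grouped_track1.keys()).union(grouped_track2.keys()))
--
--     for time in all_times:
--         base_set = set(grouped_track1.get(time, []))
--         update_set = set(grouped_track2.get(time, []))
--         if base_set != update_set:
--             added = update_set - base_set
--             removed = base_set - update_set
--
--             if added or removed:
--                 # Check for corresponding events within the time threshold
--                 close_matches = False
--                 for other_time in all_times:
--                     if time != other_time and abs(time - other_time) <= time_threshold:
--                         other_base_set = set(grouped_track1.get(other_time, []))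
--                         other_update_set = set(grouped_track2.get(other_time, []))
--                         if (removed & other_update_set) or (added & other_base_set):
--                             close_matches = True
--                             break
--
--                 if not close_matches:
--                     differences.append((time, list(removed), list(added)))
--                 else:
--                     # Check if removed notes have corresponding added notes within the threshold
--                     for note in removed:
--                         if not any(note in set(grouped_track2.get(t, [])) for t in all_times if abs(time - t) <= time_threshold):
--                             differences.append((time, [note], []))
--
--                     # Check if added notes have corresponding removed notes within the threshold
--                     for note in added:
--                         if not any(note in set(grouped_track1.get(t, [])) for t in all_times if abs(time - t) <= time_threshold):
--                             differences.append((time, [], [note]))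
--
--     return differences
-- ===== SOURCE B (Python) =====
-- # B: different algorithm. Grouping keeps the group keys in a sorted list and finds the
-- # nearest existing key by hand-written binary search over at most two neighbour
-- # candidates (ties broken by insertion rank), instead of A's min() scan over all keys.
-- # The comparison pass builds a per-note inverted index (note -> sorted list of grouped
-- # times it occurs at) once, and answers every "is there a matching event within the
-- # threshold?" question by binary search in that note's time list, instead of A's
-- # rescans over all_times that rebuild the per-time sets for every pair and every note.
--
-- def _bisect_left(a, x):
--     # CPython's bisect_left loop, hand-written (A's module imports no bisect).
--     lo, hi = 0, len(a)
--     while lo < hi: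
--         mid = (lo + hi) // 2
--         if a[mid] < x:
--             lo = mid + 1
--         else:
--             hi = mid
--     return lo
--
--
-- def _group_events_by_time_window(events, time_window):
--     grouped = {}
--     keys_sorted = []
--     rank = {}
--     for time, notes in events.items():
--         i = _bisect_left(keys_sorted, time)
--         best = None
--         for k in ([keys_sorted[i - 1]] if i > 0 else []) + (
--                 [keys_sorted[i]] if i < len(keys_sorted) else []):
--             d = abs(k - time)
--             if d <= time_window and (
--                     best is None or d < abs(best - time)
--                     or (d == abs(best - time) and rank[k] < rank[best])):
--                 best = k
--         if best is None:
--             best = time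
--         if best not in grouped:
--             rank[best] = len(grouped)
--             grouped[best] = []
--             keys_sorted.insert(_bisect_left(keys_sorted, best), best)
--         grouped[best].extend(notes)
--     return grouped
--
--
-- def _has_match_near(occ, note, time, time_threshold):
--     ts = occ.get(note, [])
--     i = _bisect_left(ts, time - time_threshold)
--     return i < len(ts) and ts[i] <= time + time_threshold
--
--
-- def compare_tracks(track1_events, track2_events, time_window, time_threshold):
--     grouped_track1 = _group_events_by_time_window(track1_events, time_window)
--     grouped_track2 = _group_events_by_time_window(track2_events, time_window)
--
--     all_times = sorted(set(grouped_track1) | set(grouped_track2))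
--
--     occ1 = {}
--     occ2 = {}
--     for t in all_times:
--         for n in set(grouped_track1.get(t, [])):
--             occ1.setdefault(n, []).append(t)
--         for n in set(grouped_track2.get(t, [])):
--             occ2.setdefault(n, []).append(t)
--
--     differences = []
--     for time in all_times:
--         base_set = set(grouped_track1.get(time, []))
--         update_set = set(grouped_track2.get(time, []))
--         removed = list(base_set - update_set)
--         added = list(update_set - base_set)
--         if not removed and not added:
--             continue
--         removed_far = [n for n in removed
--                        if not _has_match_near(occ2, n, time, time_threshold)]
--         added_far = [n for n in added
--                      if not _has_match_near(occ1, n, time, time_threshold)]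
--         if len(removed_far) == len(removed) and len(added_far) == len(added):
--             differences.append((time, removed, added))
--         else:
--             differences.extend((time, [n], []) for n in removed_far)
--             differences.extend((time, [], [n]) for n in added_far)
--     return differences
-- ===== Notes on version B (the rewrite author's own statement) =====
-- stated objective: faster
-- what changed: B replaces A's min()-scan over all existing group keys by a sorted key list with hand-written binary search over the two neighbour candidates (insertion rank breaks ties), and replaces A's comparison pass - which rescans all_times and rebuilds per-time sets for every (time, other_time) pair and again for every removed/added note - by a per-note inverted index (note -> sorted list of grouped times) built once and queried by binary search.
import Mathlib
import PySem

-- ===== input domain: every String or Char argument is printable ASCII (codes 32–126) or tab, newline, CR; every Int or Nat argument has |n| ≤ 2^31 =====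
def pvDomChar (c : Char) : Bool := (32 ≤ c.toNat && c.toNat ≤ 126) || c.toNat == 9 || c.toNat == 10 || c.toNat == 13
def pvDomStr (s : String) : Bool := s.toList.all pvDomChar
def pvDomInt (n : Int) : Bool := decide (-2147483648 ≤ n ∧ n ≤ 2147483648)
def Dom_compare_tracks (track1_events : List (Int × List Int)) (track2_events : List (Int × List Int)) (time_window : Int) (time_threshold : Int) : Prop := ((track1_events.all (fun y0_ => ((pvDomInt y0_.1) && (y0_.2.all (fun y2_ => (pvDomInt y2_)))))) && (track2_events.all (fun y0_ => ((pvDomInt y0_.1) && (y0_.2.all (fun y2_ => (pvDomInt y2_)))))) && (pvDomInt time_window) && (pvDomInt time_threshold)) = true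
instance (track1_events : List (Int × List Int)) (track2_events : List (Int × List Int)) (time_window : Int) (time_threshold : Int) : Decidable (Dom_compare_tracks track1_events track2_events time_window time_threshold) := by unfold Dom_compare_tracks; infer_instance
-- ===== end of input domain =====

-- B groups with a sorted key list + hand-written binary search (rank dict breaks ties)
-- instead of A's min() scan over all keys, and answers every threshold query through a
-- per-note inverted index (note -> sorted grouped times) queried by binary search,
-- instead of A's rescans over all_times (measured faster).
--
-- SHARED ORDER MODEL (used by BOTH ports, because both Pythons produce `list(removed)` /
-- `list(added)` in CPython's set iteration order): an exact model of CPython's int-set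
-- hash table (hash = identity except -1 ↦ -2; open addressing with 9 linear probes and
-- perturb >>= 5; growth ×4 at the 3/5 load factor; `set - set` takes the copy path when
-- len(lhs)//4 > len(rhs), else rebuilds), checked against CPython 3.11 on randomized
-- inputs. It is used ONLY to order the members of a set difference; all membership and
-- emptiness logic goes through PySem.Set.

def pvHash (x : Int) : Int := if x = -1 then -2 else x
def pvUHash (x : Int) : Nat := ((pvHash x).emod (2^64)).toNat
def pvSlot (x : Int) (size : Nat) : Nat := ((pvHash x).emod (size : Int)).toNat

-- scan n slots from j: some (some k) = free slot k, some none = key present, none = keep probing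
def pvScan (tab : List (Option Int)) (key : Int) (chk : Bool) : Nat → Nat → Option (Option Nat)
  | _, 0 => none
  | j, n+1 =>
    match tab.getD j none with
    | none => some (some j)
    | some e => if chk && decide (e = key) then some none else pvScan tab key chk (j+1) n

-- CPython probing loop; the fuel only makes the loop total (a table with a free slot is
-- always found long before 64 + 2·size steps: perturb reaches 0 within 13 shifts and
-- i ↦ 5i+1 mod 2^k is a full cycle)
def pvProbe (tab : List (Option Int)) (key : Int) (chk : Bool) : Nat → Nat → Nat → Option Nat
  | 0, _, _ => none
  | fuel+1, i, perturb =>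
    match pvScan tab key chk i 1 with
    | some r => r
    | none =>
      match (if i + 9 ≤ tab.length - 1 then pvScan tab key chk (i+1) 9 else none) with
      | some r => r
      | none =>
        let p := perturb >>> 5
        pvProbe tab key chk fuel ((i*5 + 1 + p) % tab.length) p

def pvFuel (tab : List (Option Int)) : Nat := 64 + 2 * tab.length

def pvCleanTab (tab : List (Option Int)) (key : Int) : List (Option Int) :=
  match pvProbe tab key false (pvFuel tab) (pvSlot key tab.length) (pvUHash key) with
  | some j => tab.set j (some key)
  | none => tab

def pvGrow (minused : Nat) : Nat :=
  (List.range 64).foldl (fun ns _ => if ns ≤ minused then ns * 2 else ns) 8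

structure PvTab where
  tab : List (Option Int)
  fill : Nat
  used : Nat
deriving Repr, DecidableEq

def pvEmpty : PvTab := ⟨List.replicate 8 none, 0, 0⟩

def pvResize (t : PvTab) (minused : Nat) : PvTab :=
  let ns := pvGrow minused
  ⟨(t.tab.filterMap id).foldl pvCleanTab (List.replicate ns none), t.used, t.used⟩

def pvAddKey (t : PvTab) (key : Int) : PvTab :=
  match pvProbe t.tab key true (pvFuel t.tab) (pvSlot key t.tab.length) (pvUHash key) with
  | none => t
  | some j =>
    let t' : PvTab := ⟨t.tab.set j (some key), t.fill + 1, t.used + 1⟩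
    if t'.fill * 5 ≥ (t'.tab.length - 1) * 3 then
      pvResize t' (if t'.used ≤ 50000 then t'.used * 4 else t'.used * 2)
    else t'

def pvOfDedup (s : List Int) : PvTab := s.foldl pvAddKey pvEmpty

def pvCopy (a : PvTab) : PvTab :=
  let ns := if a.used * 5 ≥ 21 then pvGrow (a.used * 2) else 8
  if ns = a.tab.length then ⟨a.tab, a.used, a.used⟩
  else ⟨(a.tab.filterMap id).foldl pvCleanTab (List.replicate ns none), a.used, a.used⟩

-- the table layout of set(a) - set(b), for sets with dedup element lists a and b
def pvDiffTab (a b : List Int) : List (Option Int) :=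
  let ta := pvOfDedup a
  if a.length / 4 > b.length then (pvCopy ta).tab
  else (((ta.tab.filterMap id).filter (fun x => decide (x ∉ b))).foldl pvAddKey pvEmpty).tab

-- order the members of s by their slot in the model table; membership is exactly s by
-- construction (when the table is faithful — always in practice — the appended tail is empty)
def pvOrder (s : List Int) (tab : List (Option Int)) : List Int :=
  let o := (tab.filterMap id).filter (fun x => decide (x ∈ s))
  o ++ s.filter (fun x => decide (x ∉ o))

-- list(set(a) - set(b)) — elements and iteration order
def pvDiffList (a b : PySem.Set Int) : List Int :=
  pvOrder (PySem.Set.diff a b) (pvDiffTab a b)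

-- ===== PORT A =====
-- min(grouped.keys(), key=λt. abs(t-time) if abs(t-time)<=w else inf, default=time):
-- float('inf') is encoded by the tuple key (1, 0) vs (0, abs(t-time)) — same ordering,
-- all out-of-window keys compare equal, min keeps the first (min2? keeps the first)
def pvGroupStep (w : Int) (g : PySem.Dict Int (List Int)) (p : Int × List Int) : PySem.Dict Int (List Int) :=
  let time := p.1
  let gt := (PySem.List.min2? g.keys
      (fun t => if |t - time| ≤ w then (0 : Int) else 1)
      (fun t => if |t - time| ≤ w then |t - time| else 0)).getD time
  -- defaultdict(list): grouped[k].extend(notes) = modify k [] (· ++ notes)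
  if |gt - time| ≤ w then g.modify gt [] (· ++ p.2) else g.modify time [] (· ++ p.2)

def pvGroup (events : PySem.Dict Int (List Int)) (w : Int) : PySem.Dict Int (List Int) :=
  events.items.foldl (pvGroupStep w) PySem.Dict.empty

def compare_tracks (track1_events : List (Int × List Int)) (track2_events : List (Int × List Int)) (time_window : Int) (time_threshold : Int) : List (Int × List Int × List Int) :=
  let grouped1 := pvGroup (PySem.Dict.ofList track1_events) time_window
  let grouped2 := pvGroup (PySem.Dict.ofList track2_events) time_window
  let all_times := PySem.List.sorted (PySem.Set.union (PySem.Set.ofList grouped1.keys) grouped2.keys) (fun t => t) false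
  all_times.foldl (fun differences time =>
    let base_set := PySem.Set.ofList (grouped1.getD time [])
    let update_set := PySem.Set.ofList (grouped2.getD time [])
    if !(PySem.Set.equal base_set update_set) then
      let added := pvDiffList update_set base_set
      let removed := pvDiffList base_set update_set
      if !added.isEmpty || !removed.isEmpty then
        let close_matches := all_times.any (fun other_time =>
          decide (time ≠ other_time) && decide (|time - other_time| ≤ time_threshold) &&
            (!(PySem.Set.inter removed (PySem.Set.ofList (grouped2.getD other_time []))).isEmpty ||
             !(PySem.Set.inter added (PySem.Set.ofList (grouped1.getD other_time []))).isEmpty))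
        if !close_matches then
          differences ++ [(time, removed, added)]
        else
          let d1 := removed.foldl (fun acc note =>
            if !((all_times.filter (fun t => decide (|time - t| ≤ time_threshold))).any
                  (fun t => PySem.Set.contains (PySem.Set.ofList (grouped2.getD t [])) note)) then
              acc ++ [(time, [note], ([] : List Int))] else acc) differences
          added.foldl (fun acc note =>
            if !((all_times.filter (fun t => decide (|time - t| ≤ time_threshold))).any
                  (fun t => PySem.Set.contains (PySem.Set.ofList (grouped1.getD t [])) note)) then
              acc ++ [(time, ([] : List Int), [note])] else acc) d1
      else differences
    else differences) []

-- ===== PORT B =====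
-- Source B's _bisect_left is CPython's bisect_left lo/hi/mid loop written by hand;
-- PySem.List.bisectLeft is exactly that loop.

-- the body of the `for k in cands` selection loop of Source B's grouping
def pvCandStep (rank : PySem.Dict Int Int) (time w : Int) (b : Option Int) (k : Int) : Option Int :=
  if |k - time| ≤ w ∧ (b = none ∨ |k - time| < |b.getD 0 - time| ∨
      (|k - time| = |b.getD 0 - time| ∧ rank.getD k 0 < rank.getD (b.getD 0) 0))
  then some k else b

-- one event of the grouping loop; the state is (grouped, keys_sorted, rank).
-- keys_sorted[i-1] / keys_sorted[i] are read only under the index guards and rank[k]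
-- only at existing group keys, so getD's defaults are never read (exact there).
def pvGroupStepB (w : Int) (st : PySem.Dict Int (List Int) × List Int × PySem.Dict Int Int) (p : Int × List Int) :
    PySem.Dict Int (List Int) × List Int × PySem.Dict Int Int :=
  let g := st.1
  let ss := st.2.1
  let rank := st.2.2
  let time := p.1
  let i := PySem.List.bisectLeft ss time
  let cands := (if 0 < i then [ss.getD (i-1) 0] else []) ++ (if i < ss.length then [ss.getD i 0] else [])
  let bestO := cands.foldl (pvCandStep rank time w) none
  let best := bestO.getD time
  let st' :=
    if g.contains best then (g, ss, rank)
    else (g.insert best [], PySem.List.insert ss ((PySem.List.bisectLeft ss best : Nat) : Int) best,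
          rank.insert best (g.size : Int))
  -- grouped[best].extend(notes) on a dict that now has the key = modify best [] (· ++ notes)
  (st'.1.modify best [] (· ++ p.2), st'.2.1, st'.2.2)

def pvGroupB (events : PySem.Dict Int (List Int)) (w : Int) : PySem.Dict Int (List Int) :=
  (events.items.foldl (pvGroupStepB w) (PySem.Dict.empty, [], PySem.Dict.empty)).1

-- occ.setdefault(n, []).append(t) = modify n [] (· ++ [t]); iterating the PySem.Set
-- instead of CPython's set order changes only occ's (unobserved) key order, not any
-- occ.get(n) value, since each n receives t once
def pvOccStep (g : PySem.Dict Int (List Int)) (d : PySem.Dict Int (List Int)) (t : Int) : PySem.Dict Int (List Int) :=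
  (PySem.Set.ofList (g.getD t [])).foldl (fun d n => d.modify n [] (· ++ [t])) d

-- ts[i] is only read when i < len(ts) (Python's `and` short-circuits): getD is exact there
def pvHasNear (occ : PySem.Dict Int (List Int)) (note time thr : Int) : Bool :=
  let ts := occ.getD note []
  let i := PySem.List.bisectLeft ts (time - thr)
  decide (i < ts.length) && decide (ts.getD i 0 ≤ time + thr)

def compare_tracks_alt (track1_events : List (Int × List Int)) (track2_events : List (Int × List Int)) (time_window : Int) (time_threshold : Int) : List (Int × List Int × List Int) :=
  let grouped1 := pvGroupB (PySem.Dict.ofList track1_events) time_window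
  let grouped2 := pvGroupB (PySem.Dict.ofList track2_events) time_window
  let all_times := PySem.List.sorted (PySem.Set.union (PySem.Set.ofList grouped1.keys) grouped2.keys) (fun t => t) false
  let occ := all_times.foldl (fun (o : PySem.Dict Int (List Int) × PySem.Dict Int (List Int)) t =>
      (pvOccStep grouped1 o.1 t, pvOccStep grouped2 o.2 t)) (PySem.Dict.empty, PySem.Dict.empty)
  all_times.foldl (fun differences time =>
    let base_set := PySem.Set.ofList (grouped1.getD time [])
    let update_set := PySem.Set.ofList (grouped2.getD time [])
    let removed := pvDiffList base_set update_set
    let added := pvDiffList update_set base_set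
    if removed.isEmpty && added.isEmpty then differences
    else
      let removed_far := removed.filter (fun n => !pvHasNear occ.2 n time time_threshold)
      let added_far := added.filter (fun n => !pvHasNear occ.1 n time time_threshold)
      if removed_far.length = removed.length ∧ added_far.length = added.length then
        differences ++ [(time, removed, added)]
      else
        differences ++ removed_far.map (fun n => (time, [n], ([] : List Int)))
                    ++ added_far.map (fun n => (time, ([] : List Int), [n]))) []

-- ===== PRECONDITION & SPEC =====
def Spec_compare_tracks (track1_events : List (Int × List Int)) (track2_events : List (Int × List Int)) (time_window : Int) (time_threshold : Int) (out : List (Int × List Int × List Int)) : Prop := out = compare_tracks_alt track1_events track2_events time_window time_threshold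
instance (track1_events : List (Int × List Int)) (track2_events : List (Int × List Int)) (time_window : Int) (time_threshold : Int) (out : List (Int × List Int × List Int)) : Decidable (Spec_compare_tracks track1_events track2_events time_window time_threshold out) := by unfold Spec_compare_tracks; infer_instance

-- ===== CLAIM (what is proved, stated in full; the proofs are below) =====
def Claim_equal_compare_tracks : Prop := ∀ (track1_events : List (Int × List Int)) (track2_events : List (Int × List Int)) (time_window : Int) (time_threshold : Int), Dom_compare_tracks track1_events track2_events time_window time_threshold → Spec_compare_tracks track1_events track2_events time_window time_threshold (compare_tracks track1_events track2_events time_window time_threshold)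

-- ===== LEMMAS AND PROOFS =====

-- ---------- grouping: A's min() scan equals B's neighbour search ----------

def pvKeyOf (time : Int) (acc : Option (Int × Int)) : Int :=
  match acc with | none => time | some (k, _) => k

def pvMinStep (time w : Int) (acc : Option Int) (x : Int) : Option Int :=
  match acc with
  | none => some x
  | some m =>
    if (decide ((if |x - time| ≤ w then (0 : Int) else 1) < (if |m - time| ≤ w then (0 : Int) else 1)) ||
       (!decide ((if |m - time| ≤ w then (0 : Int) else 1) < (if |x - time| ≤ w then (0 : Int) else 1)) &&
        decide ((if |x - time| ≤ w then |x - time| else 0) < (if |m - time| ≤ w then |m - time| else 0)))) = true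
    then some x else some m

def pvBestStep (time w : Int) (b : Option (Int × Int)) (k : Int) : Option (Int × Int) :=
  let d := |k - time|
  if d ≤ w ∧ (b.isNone ∨ d < (b.getD (0, 0)).2) then some (k, d) else b

theorem pvMinStep_ne_none (time w : Int) (m : Option Int) (x : Int) :
    pvMinStep time w m x ≠ none := by
  cases m
  · simp [pvMinStep]
  · simp only [pvMinStep]
    simp [ite_eq_iff]

-- invariant between Python min(keys, key=…)'s running minimum and the first-minimal fold
theorem pv_group_key_aux (time w : Int) (keys : List Int) :
    ∀ (m : Option Int) (b : Option (Int × Int)),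
    (m = none → b = none) →
    (∀ mv, m = some mv →
      (b = none ∧ ¬(|mv - time| ≤ w)) ∨ (b = some (mv, |mv - time|) ∧ |mv - time| ≤ w)) →
    (let gt := (keys.foldl (pvMinStep time w) m).getD time
     if |gt - time| ≤ w then gt else time)
      = pvKeyOf time (keys.foldl (pvBestStep time w) b) := by
  induction keys with
  | nil =>
    intro m b h0 h1
    match m with
    | none => rw [h0 rfl]; simp [pvKeyOf]
    | some mv =>
      rcases h1 mv rfl with ⟨hb, hle⟩ | ⟨hb, hle⟩ <;> subst hb <;> simp [pvKeyOf, hle]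
  | cons x rest ih =>
    intro m b h0 h1
    simp only [List.foldl_cons]
    by_cases hx : |x - time| ≤ w
    · match m with
      | none =>
        rw [h0 rfl]
        apply ih
        · simp only [pvMinStep]
          intro hmn
          cases hmn
        · intro mv hmv
          simp only [pvMinStep, Option.some.injEq] at hmv
          subst hmv
          right; simp [pvBestStep, hx]
      | some mv =>
        rcases h1 mv rfl with ⟨hb, hle⟩ | ⟨hb, hle⟩
        · subst hb
          apply ih
          · intro hmn
            exact absurd hmn (pvMinStep_ne_none _ _ _ _)
          · intro mv' hmv'
            simp only [pvMinStep, if_pos hx, if_neg hle] at hmv'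
            rw [if_pos (by norm_num)] at hmv'
            simp only [Option.some.injEq] at hmv'
            subst hmv'
            right; simp [pvBestStep, hx]
        · subst hb
          by_cases hlt : |x - time| < |mv - time|
          · apply ih
            · intro hmn
              exact absurd hmn (pvMinStep_ne_none _ _ _ _)
            · intro mv' hmv'
              simp only [pvMinStep, if_pos hx, if_pos hle] at hmv'
              rw [if_pos (by simp [hlt])] at hmv'
              simp only [Option.some.injEq] at hmv'
              subst hmv'
              right; simp [pvBestStep, hx, hlt]
          · apply ih
            · intro hmn
              exact absurd hmn (pvMinStep_ne_none _ _ _ _)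
            · intro mv' hmv'
              simp only [pvMinStep, if_pos hx, if_pos hle] at hmv'
              rw [if_neg (by simp [hlt])] at hmv'
              simp only [Option.some.injEq] at hmv'
              subst hmv'
              right
              constructor
              · simp [pvBestStep, hx, hlt]
              · exact hle
    · match m with
      | none =>
        rw [h0 rfl]
        apply ih
        · simp only [pvMinStep]
          intro hmn
          cases hmn
        · intro mv hmv
          simp only [pvMinStep, Option.some.injEq] at hmv
          subst hmv
          left; simp [pvBestStep, hx]
      | some mv =>
        rcases h1 mv rfl with ⟨hb, hle⟩ | ⟨hb, hle⟩
        · subst hb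
          apply ih
          · intro hmn
            exact absurd hmn (pvMinStep_ne_none _ _ _ _)
          · intro mv' hmv'
            simp only [pvMinStep, if_neg hx, if_neg hle] at hmv'
            rw [if_neg (by norm_num)] at hmv'
            simp only [Option.some.injEq] at hmv'
            subst hmv'
            left
            constructor
            · simp [pvBestStep, hx]
            · exact hle
        · subst hb
          apply ih
          · intro hmn
            exact absurd hmn (pvMinStep_ne_none _ _ _ _)
          · intro mv' hmv'
            simp only [pvMinStep, if_neg hx, if_pos hle] at hmv'
            rw [if_neg (by norm_num)] at hmv'
            simp only [Option.some.injEq] at hmv'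
            subst hmv'
            right
            constructor
            · simp [pvBestStep, hx]
            · exact hle

-- A's grouping key, written as the first-minimal fold
theorem pv_group_key (keys : List Int) (time w : Int) :
    (if |((PySem.List.min2? keys
        (fun t => if |t - time| ≤ w then (0 : Int) else 1)
        (fun t => if |t - time| ≤ w then |t - time| else 0)).getD time) - time| ≤ w
     then (PySem.List.min2? keys
        (fun t => if |t - time| ≤ w then (0 : Int) else 1)
        (fun t => if |t - time| ≤ w then |t - time| else 0)).getD time
     else time)
      = pvKeyOf time (keys.foldl (pvBestStep time w) none) := by
  have hm : PySem.List.min2? keys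
      (fun t => if |t - time| ≤ w then (0 : Int) else 1)
      (fun t => if |t - time| ≤ w then |t - time| else 0)
      = keys.foldl (pvMinStep time w) none := by
    simp only [PySem.List.min2?]
    exact PySem.List.foldl_congr_mem _ _ _ _ (fun acc x _ => by cases acc <;> rfl)
  rw [hm]
  exact pv_group_key_aux time w keys none none (fun _ => rfl) (by intro _ h; cases h)

-- A's grouping step is "modify at the chosen key"
theorem pv_stepA_key (w : Int) (g : PySem.Dict Int (List Int)) (p : Int × List Int) :
    pvGroupStep w g p
      = g.modify (pvKeyOf p.1 (g.keys.foldl (pvBestStep p.1 w) none)) [] (· ++ p.2) := by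
  simp only [pvGroupStep]
  rw [← pv_group_key g.keys p.1 w]
  exact (apply_ite (fun k => PySem.Dict.modify g k [] (fun l => l ++ p.2)) _ _ _).symm

-- running-minimum spec: the first-minimal fold picks the in-window key of least
-- distance, earliest (= least rank) on ties
def pvGoodP (time w : Int) (rnk : Int → Int) (S : List Int) (acc : Option (Int × Int)) : Prop :=
  (acc = none ∧ ∀ k ∈ S, ¬(|k - time| ≤ w)) ∨
  (∃ k, acc = some (k, |k - time|) ∧ k ∈ S ∧ |k - time| ≤ w ∧
    ∀ k' ∈ S, |k' - time| ≤ w →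
      |k - time| < |k' - time| ∨ (|k - time| = |k' - time| ∧ rnk k ≤ rnk k'))

theorem pv_bestfold_good (time w : Int) (rnk : Int → Int) :
    ∀ (K S : List Int) (acc : Option (Int × Int)),
    (S ++ K).Pairwise (fun a b => rnk a < rnk b) →
    pvGoodP time w rnk S acc →
    pvGoodP time w rnk (S ++ K) (K.foldl (pvBestStep time w) acc) := by
  intro K
  induction K with
  | nil =>
    intro S acc _ h
    simpa using h
  | cons x rest ih =>
    intro S acc hp hg
    have hre : S ++ x :: rest = (S ++ [x]) ++ rest := by simp
    rw [hre] at hp ⊢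
    rw [List.foldl_cons]
    refine ih (S ++ [x]) (pvBestStep time w acc x) hp ?_
    have hpx : List.Pairwise (fun a b => rnk a < rnk b) (S ++ [x]) :=
      (List.pairwise_append.1 hp).1
    rcases hg with ⟨hacc, hall⟩ | ⟨k, hacc, hkmem, hkw, hkmin⟩
    · subst hacc
      by_cases hx : |x - time| ≤ w
      · have hstep : pvBestStep time w none x = some (x, |x - time|) := by
          simp [pvBestStep, hx]
        rw [hstep]
        right
        refine ⟨x, rfl, by simp, hx, ?_⟩
        intro k' hk' hk'w
        rcases List.mem_append.1 hk' with h | h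
        · exact absurd hk'w (hall k' h)
        · right
          rw [List.mem_singleton.1 h]
          exact ⟨rfl, le_refl _⟩
      · have hstep : pvBestStep time w none x = none := by
          simp [pvBestStep, hx]
        rw [hstep]
        left
        refine ⟨rfl, ?_⟩
        intro k' hk'
        rcases List.mem_append.1 hk' with h | h
        · exact hall k' h
        · rw [List.mem_singleton.1 h]; exact hx
    · subst hacc
      by_cases hx : |x - time| ≤ w ∧ |x - time| < |k - time|
      · have hstep : pvBestStep time w (some (k, |k - time|)) x = some (x, |x - time|) := by
          simp [pvBestStep, hx.1, hx.2]
        rw [hstep]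
        right
        refine ⟨x, rfl, by simp, hx.1, ?_⟩
        intro k' hk' hk'w
        rcases List.mem_append.1 hk' with h | h
        · left
          rcases hkmin k' h hk'w with hlt | ⟨he, _⟩
          · exact lt_trans hx.2 hlt
          · rw [← he]; exact hx.2
        · right
          rw [List.mem_singleton.1 h]
          exact ⟨rfl, le_refl _⟩
      · have hstep : pvBestStep time w (some (k, |k - time|)) x = some (k, |k - time|) := by
          simp only [pvBestStep]
          rw [if_neg]
          intro hc
          exact hx ⟨hc.1, by simpa using hc.2⟩
        rw [hstep]
        right
        refine ⟨k, rfl, List.mem_append.2 (Or.inl hkmem), hkw, ?_⟩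
        intro k' hk' hk'w
        rcases List.mem_append.1 hk' with h | h
        · exact hkmin k' h hk'w
        · have hxe := List.mem_singleton.1 h
          subst hxe
          have hkd : |k - time| ≤ |k' - time| := by
            by_contra hc
            exact hx ⟨hk'w, by omega⟩
          rcases lt_or_eq_of_le hkd with hlt | he
          · exact Or.inl hlt
          · right
            refine ⟨he, le_of_lt ?_⟩
            exact (List.pairwise_append.1 hpx).2.2 k hkmem k' (List.mem_singleton.2 rfl)

-- strictly rank-increasing keys have injective rank
theorem pv_rnk_inj (rnk : Int → Int) (K : List Int)
    (hp : K.Pairwise (fun a b => rnk a < rnk b)) :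
    ∀ a ∈ K, ∀ b ∈ K, rnk a = rnk b → a = b := by
  intro a ha b hb he
  obtain ⟨p, hpl, hpa⟩ := List.mem_iff_getElem.1 ha
  obtain ⟨q, hql, hqa⟩ := List.mem_iff_getElem.1 hb
  rcases lt_trichotomy p q with h | h | h
  · have := List.pairwise_iff_getElem.1 hp p q hpl hql h
    rw [hpa, hqa] at this; omega
  · subst h; rw [← hpa, ← hqa]
  · have := List.pairwise_iff_getElem.1 hp q p hql hpl h
    rw [hpa, hqa] at this; omega

-- B's neighbour search over the sorted key list picks the same key as A's scan
-- elements of a (≤)-sorted list are monotone in the index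
theorem pv_sorted_le_mono (ss : List Int) (hs : ss.Pairwise (· ≤ ·)) :
    ∀ p q (hp : p < ss.length) (hq : q < ss.length), p ≤ q → ss[p] ≤ ss[q] := by
  intro p q hp hq hle
  rcases Nat.lt_or_ge p q with h | h
  · exact List.pairwise_iff_getElem.1 hs p q hp hq h
  · have : p = q := by omega
    subst this; exact le_refl _

-- evaluation of the candidate-selection step
theorem pvCandStep_none (rank : PySem.Dict Int Int) (time w k : Int) :
    pvCandStep rank time w none k = if |k - time| ≤ w then some k else none := by
  simp [pvCandStep]

theorem pvCandStep_some (rank : PySem.Dict Int Int) (time w q k : Int) :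
    pvCandStep rank time w (some q) k =
      if |k - time| ≤ w ∧ (|k - time| < |q - time| ∨
          (|k - time| = |q - time| ∧ rank.getD k 0 < rank.getD q 0))
      then some k else some q := by
  simp only [pvCandStep, Option.getD_some]
  refine if_congr ?_ rfl rfl
  constructor
  · rintro ⟨h1, (hc | hc)⟩
    · exact absurd hc (Option.some_ne_none q)
    · exact ⟨h1, hc⟩
  · rintro ⟨h1, hc⟩
    exact ⟨h1, Or.inr hc⟩

-- the unique lexicographic (distance, rank) minimiser: any two results agreeing with
-- the spec coincide
theorem pv_spec_match (time w : Int) (rnk : Int → Int) (K : List Int)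
    (hrk : K.Pairwise (fun a b => rnk a < rnk b)) (r : Option Int)
    (hB : (r = none ∧ ∀ k ∈ K, ¬(|k - time| ≤ w)) ∨
          (∃ k, r = some k ∧ k ∈ K ∧ |k - time| ≤ w ∧
            ∀ k' ∈ K, |k' - time| ≤ w →
              |k - time| < |k' - time| ∨ (|k - time| = |k' - time| ∧ rnk k ≤ rnk k')))
    (acc : Option (Int × Int)) (hA : pvGoodP time w rnk K acc) :
    r.getD time = pvKeyOf time acc := by
  rcases hA with ⟨ha, hallA⟩ | ⟨k, ha, hkm, hkw, hkmin⟩ <;> subst ha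
  · rcases hB with ⟨hb, _⟩ | ⟨k, hb, hkm, hkw, _⟩
    · subst hb; rfl
    · exact absurd hkw (hallA k hkm)
  · rcases hB with ⟨hb, hallB⟩ | ⟨k', hb, hk'm, hk'w, hk'min⟩
    · exact absurd hkw (hallB k hkm)
    · subst hb
      show k' = k
      rcases hkmin k' hk'm hk'w with h1 | ⟨he1, hr1⟩ <;>
        rcases hk'min k hkm hkw with h2 | ⟨he2, hr2⟩
      · omega
      · omega
      · omega
      · exact pv_rnk_inj rnk K hrk k' hk'm k hkm (le_antisymm hr2 hr1)

theorem pv_best_eq (time w : Int) (ss K : List Int) (rank : PySem.Dict Int Int)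
    (hsort : ss.Pairwise (· < ·)) (hperm : ss.Perm K)
    (hrk : K.Pairwise (fun a b => rank.getD a 0 < rank.getD b 0)) :
    ((((if 0 < PySem.List.bisectLeft ss time then [ss.getD (PySem.List.bisectLeft ss time - 1) 0] else []) ++
       (if PySem.List.bisectLeft ss time < ss.length then [ss.getD (PySem.List.bisectLeft ss time) 0] else [])).foldl
        (pvCandStep rank time w) none).getD time)
      = pvKeyOf time (K.foldl (pvBestStep time w) none) := by
  have hle : ss.Pairwise (· ≤ ·) := hsort.imp (fun h => le_of_lt h)
  obtain ⟨hlen, hlt, hge⟩ := PySem.List.bisectLeft_spec ss time hle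
  set i := PySem.List.bisectLeft ss time with hi
  have hGood := pv_bestfold_good time w (fun k => rank.getD k 0) K [] none (by simpa using hrk)
      (Or.inl ⟨rfl, by simp⟩)
  simp only [List.nil_append] at hGood
  refine pv_spec_match time w (fun k => rank.getD k 0) K hrk _ ?_ _ hGood
  have hSplit : ∀ k ∈ K, (k < time ∧ 0 < i ∧ k ≤ ss.getD (i - 1) 0) ∨
      (time ≤ k ∧ i < ss.length ∧ ss.getD i 0 ≤ k) := by
    intro k hk
    obtain ⟨j, hj, hja⟩ := List.mem_iff_getElem.1 (hperm.mem_iff.2 hk)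
    by_cases hji : j < i
    · left
      have h1 := hlt j hj hji
      rw [hja] at h1
      have hi1 : i - 1 < ss.length := by omega
      refine ⟨h1, by omega, ?_⟩
      rw [List.getD_eq_getElem ss 0 hi1]
      have h2 := pv_sorted_le_mono ss hle j (i - 1) hj hi1 (by omega)
      rw [hja] at h2
      exact h2
    · right
      have hij : i ≤ j := by omega
      have h1 := hge j hj hij
      rw [hja] at h1
      have hil : i < ss.length := by omega
      refine ⟨h1, hil, ?_⟩
      rw [List.getD_eq_getElem ss 0 hil]
      have h2 := pv_sorted_le_mono ss hle i j hil hj hij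
      rw [hja] at h2
      exact h2
  have hmemP : 0 < i → ss.getD (i - 1) 0 ∈ K := by
    intro h
    have hi1 : i - 1 < ss.length := by omega
    rw [List.getD_eq_getElem ss 0 hi1]
    exact hperm.mem_iff.1 (List.getElem_mem hi1)
  have hmemS : i < ss.length → ss.getD i 0 ∈ K := by
    intro h
    rw [List.getD_eq_getElem ss 0 h]
    exact hperm.mem_iff.1 (List.getElem_mem h)
  have hPt : 0 < i → ss.getD (i - 1) 0 < time := by
    intro h
    have hi1 : i - 1 < ss.length := by omega
    rw [List.getD_eq_getElem ss 0 hi1]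
    exact hlt (i - 1) hi1 (by omega)
  have hSt : i < ss.length → time ≤ ss.getD i 0 := by
    intro h
    rw [List.getD_eq_getElem ss 0 h]
    exact hge i h (le_refl _)
  by_cases hip : 0 < i
  · by_cases his : i < ss.length
    · -- both neighbour candidates exist
      rw [if_pos hip, if_pos his]
      set P := ss.getD (i - 1) 0 with hPd
      set S' := ss.getD i 0 with hSd
      have hPm := hmemP hip
      have hSm := hmemS his
      have hPlt := hPt hip
      have hSge := hSt his
      have habsP : |P - time| = time - P := by rw [abs_of_neg (by omega)]; ring
      have habsS : |S' - time| = S' - time := abs_of_nonneg (by omega)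
      simp only [List.singleton_append, List.foldl_cons, List.foldl_nil]
      by_cases hwp : |P - time| ≤ w
      · rw [pvCandStep_none, if_pos hwp]
        by_cases hws : |S' - time| ≤ w
        · by_cases hrep : |S' - time| < |P - time| ∨
              (|S' - time| = |P - time| ∧ rank.getD S' 0 < rank.getD P 0)
          · rw [pvCandStep_some, if_pos ⟨hws, hrep⟩]
            right
            refine ⟨S', rfl, hSm, hws, ?_⟩
            intro k' hk' hk'w
            rcases hSplit k' hk' with ⟨h1, _, h3⟩ | ⟨h1, _, h3⟩
            · have habsK : |k' - time| = time - k' := by rw [abs_of_neg (by omega)]; ring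
              rcases hrep with hlt' | ⟨heq', hr'⟩
              · left; rw [habsK]; rw [habsP] at hlt'; omega
              · rcases lt_or_eq_of_le (show time - P ≤ time - k' by omega) with h | h
                · left; rw [habsK, habsS, habsP] at *; omega
                · have hk'P : k' = P := by omega
                  right
                  refine ⟨by rw [habsK, habsS, habsP] at *; omega, ?_⟩
                  rw [hk'P]
                  exact le_of_lt hr'
            · have habsK : |k' - time| = k' - time := abs_of_nonneg (by omega)
              rcases lt_or_eq_of_le (show S' - time ≤ k' - time by omega) with h | h
              · left; rw [habsK, habsS]; omega
              · have hk'S : k' = S' := by omega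
                right
                exact ⟨by rw [habsK, habsS]; omega, by rw [hk'S]⟩
          · rw [pvCandStep_some, if_neg (fun hc => hrep hc.2)]
            have hnl : ¬(|S' - time| < |P - time|) := fun hc => hrep (Or.inl hc)
            have himp : |S' - time| = |P - time| → rank.getD P 0 ≤ rank.getD S' 0 := by
              intro he
              by_contra hc
              exact hrep (Or.inr ⟨he, by omega⟩)
            right
            refine ⟨P, rfl, hPm, hwp, ?_⟩
            intro k' hk' hk'w
            rcases hSplit k' hk' with ⟨h1, _, h3⟩ | ⟨h1, _, h3⟩
            · have habsK : |k' - time| = time - k' := by rw [abs_of_neg (by omega)]; ring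
              rcases lt_or_eq_of_le (show time - P ≤ time - k' by omega) with h | h
              · left; rw [habsK, habsP]; omega
              · have hk'P : k' = P := by omega
                right
                exact ⟨by rw [habsK, habsP]; omega, by rw [hk'P]⟩
            · have habsK : |k' - time| = k' - time := abs_of_nonneg (by omega)
              have hnl' : time - P ≤ S' - time := by rw [habsP, habsS] at hnl; omega
              rcases lt_or_eq_of_le (show time - P ≤ k' - time by omega) with h | h
              · left; rw [habsK, habsP]; omega
              · have hk'S : k' = S' := by omega
                right
                refine ⟨by rw [habsK, habsP]; omega, ?_⟩
                rw [hk'S]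
                exact himp (by rw [habsP, habsS]; omega)
        · rw [pvCandStep_some, if_neg (fun hc => hws hc.1)]
          right
          refine ⟨P, rfl, hPm, hwp, ?_⟩
          intro k' hk' hk'w
          rcases hSplit k' hk' with ⟨h1, _, h3⟩ | ⟨h1, _, h3⟩
          · have habsK : |k' - time| = time - k' := by rw [abs_of_neg (by omega)]; ring
            rcases lt_or_eq_of_le (show time - P ≤ time - k' by omega) with h | h
            · left; rw [habsK, habsP]; omega
            · have hk'P : k' = P := by omega
              right
              exact ⟨by rw [habsK, habsP]; omega, by rw [hk'P]⟩
          · exfalso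
            have habsK : |k' - time| = k' - time := abs_of_nonneg (by omega)
            rw [habsS] at hws
            rw [habsK] at hk'w
            omega
      · rw [pvCandStep_none, if_neg hwp]
        by_cases hws : |S' - time| ≤ w
        · rw [pvCandStep_none, if_pos hws]
          right
          refine ⟨S', rfl, hSm, hws, ?_⟩
          intro k' hk' hk'w
          rcases hSplit k' hk' with ⟨h1, _, h3⟩ | ⟨h1, _, h3⟩
          · exfalso
            have habsK : |k' - time| = time - k' := by rw [abs_of_neg (by omega)]; ring
            rw [habsP] at hwp
            rw [habsK] at hk'w
            omega
          · have habsK : |k' - time| = k' - time := abs_of_nonneg (by omega)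
            rcases lt_or_eq_of_le (show S' - time ≤ k' - time by omega) with h | h
            · left; rw [habsK, habsS]; omega
            · have hk'S : k' = S' := by omega
              right
              exact ⟨by rw [habsK, habsS]; omega, by rw [hk'S]⟩
        · rw [pvCandStep_none, if_neg hws]
          left
          refine ⟨rfl, ?_⟩
          intro k hk hkw
          rcases hSplit k hk with ⟨h1, _, h3⟩ | ⟨h1, _, h3⟩
          · have habsK : |k - time| = time - k := by rw [abs_of_neg (by omega)]; ring
            rw [habsP] at hwp
            rw [habsK] at hkw
            omega
          · have habsK : |k - time| = k - time := abs_of_nonneg (by omega)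
            rw [habsS] at hws
            rw [habsK] at hkw
            omega
    · -- only the left neighbour exists: every key is below time
      rw [if_pos hip, if_neg his, List.append_nil]
      set P := ss.getD (i - 1) 0 with hPd
      have hPm := hmemP hip
      have hPlt := hPt hip
      have habsP : |P - time| = time - P := by rw [abs_of_neg (by omega)]; ring
      have hallL : ∀ k ∈ K, k < time ∧ k ≤ P := by
        intro k hk
        rcases hSplit k hk with ⟨h1, _, h3⟩ | ⟨_, h2, _⟩
        · exact ⟨h1, h3⟩
        · exact absurd h2 his
      simp only [List.foldl_cons, List.foldl_nil]
      by_cases hwp : |P - time| ≤ w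
      · rw [pvCandStep_none, if_pos hwp]
        right
        refine ⟨P, rfl, hPm, hwp, ?_⟩
        intro k' hk' hk'w
        obtain ⟨hk't, hk'le⟩ := hallL k' hk'
        have habsK : |k' - time| = time - k' := by rw [abs_of_neg (by omega)]; ring
        rcases lt_or_eq_of_le (show time - P ≤ time - k' by omega) with h | h
        · left; rw [habsK, habsP]; omega
        · have hk'P : k' = P := by omega
          right
          exact ⟨by rw [habsK, habsP]; omega, by rw [hk'P]⟩
      · rw [pvCandStep_none, if_neg hwp]
        left
        refine ⟨rfl, ?_⟩
        intro k hk hkw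
        obtain ⟨hkt, hkle⟩ := hallL k hk
        have habsK : |k - time| = time - k := by rw [abs_of_neg (by omega)]; ring
        rw [habsP] at hwp
        rw [habsK] at hkw
        omega
  · by_cases his : i < ss.length
    · -- only the right neighbour exists: every key is at or above time
      rw [if_neg hip, if_pos his, List.nil_append]
      set S' := ss.getD i 0 with hSd
      have hSm := hmemS his
      have hSge := hSt his
      have habsS : |S' - time| = S' - time := abs_of_nonneg (by omega)
      have hallR : ∀ k ∈ K, time ≤ k ∧ S' ≤ k := by
        intro k hk
        rcases hSplit k hk with ⟨_, h2, _⟩ | ⟨h1, _, h3⟩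
        · exact absurd h2 hip
        · exact ⟨h1, h3⟩
      simp only [List.foldl_cons, List.foldl_nil]
      by_cases hws : |S' - time| ≤ w
      · rw [pvCandStep_none, if_pos hws]
        right
        refine ⟨S', rfl, hSm, hws, ?_⟩
        intro k' hk' hk'w
        obtain ⟨hk't, hk'le⟩ := hallR k' hk'
        have habsK : |k' - time| = k' - time := abs_of_nonneg (by omega)
        rcases lt_or_eq_of_le (show S' - time ≤ k' - time by omega) with h | h
        · left; rw [habsK, habsS]; omega
        · have hk'S : k' = S' := by omega
          right
          exact ⟨by rw [habsK, habsS]; omega, by rw [hk'S]⟩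
      · rw [pvCandStep_none, if_neg hws]
        left
        refine ⟨rfl, ?_⟩
        intro k hk hkw
        obtain ⟨hkt, hkle⟩ := hallR k hk
        have habsK : |k - time| = k - time := abs_of_nonneg (by omega)
        rw [habsS] at hws
        rw [habsK] at hkw
        omega
    · -- no candidates: the key list is empty
      rw [if_neg hip, if_neg his, List.append_nil]
      left
      refine ⟨rfl, ?_⟩
      intro k hk _
      rcases hSplit k hk with ⟨_, h2, _⟩ | ⟨_, h2, _⟩
      · exact hip h2
      · exact his h2

-- ---------- grouping: the fold invariant ----------

def pvInv (g : PySem.Dict Int (List Int)) (st : PySem.Dict Int (List Int) × List Int × PySem.Dict Int Int) : Prop :=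
  st.1 = g ∧ st.2.1.Pairwise (· < ·) ∧ st.2.1.Perm g.keys ∧
  g.keys.Pairwise (fun a b => st.2.2.getD a 0 < st.2.2.getD b 0) ∧
  (∀ k ∈ g.keys, st.2.2.getD k 0 < (g.size : Int))

theorem pv_inv_step (w : Int) (g : PySem.Dict Int (List Int))
    (st : PySem.Dict Int (List Int) × List Int × PySem.Dict Int Int) (p : Int × List Int)
    (h : pvInv g st) : pvInv (pvGroupStep w g p) (pvGroupStepB w st p) := by
  obtain ⟨g', ss, rank⟩ := st
  unfold pvInv at h
  obtain ⟨h1, hsort, hperm, hrk, hbound⟩ := h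
  simp only at h1 hsort hperm hrk hbound
  subst h1
  rw [pv_stepA_key]
  simp only [pvGroupStepB]
  rw [pv_best_eq p.1 w ss g'.keys rank hsort hperm hrk]
  set kA := pvKeyOf p.1 (g'.keys.foldl (pvBestStep p.1 w) none) with hkA
  cases hc : g'.contains kA
  · -- kA is a NEW key
    rw [if_neg Bool.false_ne_true]
    have hnm : kA ∉ g'.keys := by
      intro hm
      have := (PySem.Dict.contains_iff_mem_keys g' kA).2 hm
      rw [hc] at this
      cases this
    have hnss : kA ∉ ss := fun hm => hnm (hperm.mem_iff.1 hm)
    obtain ⟨hlen', hlt', hge'⟩ :=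
      PySem.List.bisectLeft_spec ss kA (hsort.imp (fun h => le_of_lt h))
    set p' := PySem.List.bisectLeft ss kA with hp'
    have hins : PySem.List.insert ss ((p' : Nat) : Int) kA = ss.take p' ++ kA :: ss.drop p' :=
      PySem.List.insert_natCast ss p' kA hlen'
    have hdict : (g'.insert kA []).modify kA [] (· ++ p.2) = g'.modify kA [] (· ++ p.2) := by
      simp only [PySem.Dict.modify, PySem.Dict.getD_insert_self, PySem.Dict.insert_insert_self]
      rw [PySem.Dict.getD_of_not_contains g' ([] : List Int) hc]
    have hkeys : (g'.modify kA [] (· ++ p.2)).keys = g'.keys ++ [kA] := by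
      rw [PySem.Dict.keys_modify, PySem.Dict.keys_insert_of_not_contains g' _ hc]
    have hsize : (g'.modify kA [] (· ++ p.2)).size = g'.size + 1 := by
      simp only [PySem.Dict.modify]
      rw [PySem.Dict.size_insert, hc]
      simp
    have hgd : ∀ a ∈ g'.keys, (rank.insert kA (g'.size : Int)).getD a 0 = rank.getD a 0 := by
      intro a ha
      rw [PySem.Dict.getD_insert]
      rw [if_neg (fun he => hnm (by rw [← he]; exact ha))]
    have hgdk : (rank.insert kA (g'.size : Int)).getD kA 0 = (g'.size : Int) :=
      PySem.Dict.getD_insert_self rank kA _ 0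
    unfold pvInv
    dsimp only
    rw [hkeys, hsize, hins]
    refine ⟨hdict, ?_, ?_, ?_, ?_⟩
    · -- the inserted key list stays strictly sorted
      rw [List.pairwise_append]
      refine ⟨hsort.take, List.pairwise_cons.2 ⟨?_, hsort.drop⟩, ?_⟩
      · intro b hb
        obtain ⟨j, hjm, hjb⟩ := List.mem_drop_iff_getElem.1 hb
        have h1 := hge' (p' + j) (by omega) (by omega)
        rw [hjb] at h1
        have hbmem : b ∈ ss := by
          rw [← hjb]
          exact List.getElem_mem (by omega)
        have hne : kA ≠ b := fun he => hnss (by rw [he]; exact hbmem)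
        exact lt_of_le_of_ne h1 hne
      · intro a ha b hb
        obtain ⟨j, hjm, hja⟩ := List.mem_take_iff_getElem.1 ha
        have h1 := hlt' j (by omega) (by omega)
        rw [hja] at h1
        rcases List.mem_cons.1 hb with rfl | hb'
        · exact h1
        · obtain ⟨j2, hj2m, hj2b⟩ := List.mem_drop_iff_getElem.1 hb'
          have h2 := hge' (p' + j2) (by omega) (by omega)
          rw [hj2b] at h2
          omega
    · -- it is a permutation of the new key list
      refine List.perm_middle.trans ?_
      rw [List.take_append_drop]
      exact (hperm.cons kA).trans (List.perm_append_singleton kA g'.keys).symm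
    · -- ranks stay strictly increasing along the key list
      rw [List.pairwise_append]
      refine ⟨hrk.imp_of_mem (fun ha hb hr => by rw [hgd _ ha, hgd _ hb]; exact hr),
        List.pairwise_singleton _ _, ?_⟩
      intro a ha b hb
      rw [List.mem_singleton.1 hb, hgd a ha, hgdk]
      exact hbound a ha
    · -- and stay bounded by the new size
      intro k hk
      push_cast
      rcases List.mem_append.1 hk with h | h
      · rw [hgd k h]
        have := hbound k h
        omega
      · rw [List.mem_singleton.1 h, hgdk]
        omega
  · -- kA is an existing key: the state only extends its note list
    rw [if_pos rfl]
    have hkeys : (g'.modify kA [] (· ++ p.2)).keys = g'.keys := by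
      rw [PySem.Dict.keys_modify, PySem.Dict.keys_insert_of_contains g' _ hc]
    have hsize : (g'.modify kA [] (· ++ p.2)).size = g'.size := by
      simp only [PySem.Dict.modify]
      rw [PySem.Dict.size_insert, hc]
      simp
    unfold pvInv
    dsimp only
    rw [hkeys, hsize]
    exact ⟨rfl, hsort, hperm, hrk, hbound⟩

theorem pv_inv_fold (w : Int) (l : List (Int × List Int)) :
    ∀ (g : PySem.Dict Int (List Int)) st, pvInv g st →
    pvInv (l.foldl (pvGroupStep w) g) (l.foldl (pvGroupStepB w) st) := by
  induction l with
  | nil => intro g st h; exact h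
  | cons p rest ih =>
    intro g st h
    exact ih _ _ (pv_inv_step w g st p h)

theorem pvGroupB_eq (events : PySem.Dict Int (List Int)) (w : Int) :
    pvGroupB events w = pvGroup events w := by
  have h0 : pvInv PySem.Dict.empty ((PySem.Dict.empty : PySem.Dict Int (List Int)), ([] : List Int), (PySem.Dict.empty : PySem.Dict Int Int)) := by
    refine ⟨rfl, List.Pairwise.nil, ?_, ?_, ?_⟩ <;> simp [PySem.Dict.keys_empty]
  have h := pv_inv_fold w events.items PySem.Dict.empty _ h0
  exact h.1

-- ---------- the inverted index and its binary-search query ----------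

theorem pv_occ_pair_split (g1 g2 : PySem.Dict Int (List Int)) (l : List Int)
    (d1 d2 : PySem.Dict Int (List Int)) :
    l.foldl (fun (o : PySem.Dict Int (List Int) × PySem.Dict Int (List Int)) t =>
        (pvOccStep g1 o.1 t, pvOccStep g2 o.2 t)) (d1, d2)
      = (l.foldl (pvOccStep g1) d1, l.foldl (pvOccStep g2) d2) := by
  induction l generalizing d1 d2 with
  | nil => rfl
  | cons t rest ih => simp only [List.foldl_cons]; exact ih _ _

theorem pv_occStep_getD (g : PySem.Dict Int (List Int)) (d : PySem.Dict Int (List Int)) (t n : Int) :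
    (pvOccStep g d t).getD n []
      = d.getD n [] ++ (if (PySem.Set.ofList (g.getD t [])).contains n then [t] else []) := by
  unfold pvOccStep
  have h1 : (PySem.Set.ofList (g.getD t []) : List Int).foldl (fun d n => d.modify n [] (· ++ [t])) d
      = ((PySem.Set.ofList (g.getD t []) : List Int).map (fun m => (m, t))).foldl
          (fun d p => d.modify p.1 [] (· ++ [p.2])) d := by
    rw [List.foldl_map]
  rw [h1, PySem.Dict.getD_foldl_modify_append]
  congr 1
  rw [List.filter_map]
  have h2 : ((fun p : Int × Int => p.1 == n) ∘ (fun m : Int => (m, t))) = (fun m : Int => m == n) := rfl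
  rw [h2, List.filter_beq]
  by_cases h : n ∈ (PySem.Set.ofList (g.getD t []) : List Int)
  · rw [List.count_eq_one_of_mem (PySem.Set.nodup_ofList _) h,
      if_pos ((PySem.Set.contains_iff _ _).2 ((PySem.Set.mem_ofList _ _).2 ((PySem.Set.mem_ofList _ _).1 h)))]
    rfl
  · rw [List.count_eq_zero_of_not_mem h,
      if_neg (by intro hc; exact h ((PySem.Set.contains_iff _ _).1 hc))]
    rfl

theorem pv_occ_getD (g : PySem.Dict Int (List Int)) (l : List Int) (n : Int) :
    ∀ d : PySem.Dict Int (List Int),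
    (l.foldl (pvOccStep g) d).getD n []
      = d.getD n [] ++ l.filter (fun t => (PySem.Set.ofList (g.getD t [])).contains n) := by
  induction l with
  | nil => intro d; simp
  | cons t rest ih =>
    intro d
    simp only [List.foldl_cons, List.filter_cons, ih, pv_occStep_getD, List.append_assoc]
    have hc : ((PySem.Set.ofList (g.getD t [])).contains n = true) ↔ n ∈ g.getD t [] := by
      rw [PySem.Set.contains_iff, PySem.Set.mem_ofList]
    by_cases h : n ∈ g.getD t []
    · simp [h]
    · simp [h]

theorem pv_hasNear_iff (occ : PySem.Dict Int (List Int)) (n time thr : Int)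
    (hs : (occ.getD n []).Pairwise (· ≤ ·)) :
    pvHasNear occ n time thr = true ↔
      ∃ t ∈ occ.getD n [], time - thr ≤ t ∧ t ≤ time + thr := by
  unfold pvHasNear
  obtain ⟨hlen, hlt, hge⟩ := PySem.List.bisectLeft_spec (occ.getD n []) (time - thr) hs
  set ts := occ.getD n [] with hts
  set i := PySem.List.bisectLeft ts (time - thr) with hi
  rw [Bool.and_eq_true, decide_eq_true_eq, decide_eq_true_eq]
  constructor
  · rintro ⟨hilen, hle⟩
    rw [List.getD_eq_getElem ts 0 hilen] at hle
    exact ⟨ts[i], List.getElem_mem hilen, hge i hilen (le_refl _), hle⟩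
  · rintro ⟨t, ht, hb1, hb2⟩
    obtain ⟨j, hj, hja⟩ := List.mem_iff_getElem.1 ht
    have hij : i ≤ j := by
      rcases Nat.lt_or_ge j i with hc | hc
      · exfalso
        have hx := hlt j hj hc
        rw [hja] at hx
        omega
      · exact hc
    have hilen : i < ts.length := lt_of_le_of_lt hij hj
    have hmono : ts[i] ≤ ts[j] := pv_sorted_le_mono ts hs i j hilen hj hij
    rw [hja] at hmono
    refine ⟨hilen, ?_⟩
    rw [List.getD_eq_getElem ts 0 hilen]
    omega

-- ---------- the per-time output chunks ----------

-- the list of tuples port A emits for one `time` (A's per-time body with the appends factored out)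
def pvChunkA (g1 g2 : PySem.Dict Int (List Int)) (allT : List Int) (thr time : Int) : List (Int × List Int × List Int) :=
  let base_set := PySem.Set.ofList (g1.getD time [])
  let update_set := PySem.Set.ofList (g2.getD time [])
  if !(PySem.Set.equal base_set update_set) then
    let added := pvDiffList update_set base_set
    let removed := pvDiffList base_set update_set
    if !added.isEmpty || !removed.isEmpty then
      let close := allT.any (fun ot =>
        decide (time ≠ ot) && decide (|time - ot| ≤ thr) &&
          (!(PySem.Set.inter removed (PySem.Set.ofList (g2.getD ot []))).isEmpty ||
           !(PySem.Set.inter added (PySem.Set.ofList (g1.getD ot []))).isEmpty))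
      if !close then [(time, removed, added)]
      else ((removed.filter (fun note =>
              !((allT.filter (fun t => decide (|time - t| ≤ thr))).any
                  (fun t => PySem.Set.contains (PySem.Set.ofList (g2.getD t [])) note)))).map
              (fun note => (time, [note], ([] : List Int))))
        ++ ((added.filter (fun note =>
              !((allT.filter (fun t => decide (|time - t| ≤ thr))).any
                  (fun t => PySem.Set.contains (PySem.Set.ofList (g1.getD t [])) note)))).map
              (fun note => (time, ([] : List Int), [note])))
    else []
  else []

-- the list of tuples port B emits for one `time`
def pvChunkB (g1 g2 : PySem.Dict Int (List Int)) (occ1 occ2 : PySem.Dict Int (List Int)) (thr time : Int) : List (Int × List Int × List Int) :=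
  let removed := pvDiffList (PySem.Set.ofList (g1.getD time [])) (PySem.Set.ofList (g2.getD time []))
  let added := pvDiffList (PySem.Set.ofList (g2.getD time [])) (PySem.Set.ofList (g1.getD time []))
  if removed.isEmpty && added.isEmpty then []
  else
    let removed_far := removed.filter (fun n => !pvHasNear occ2 n time thr)
    let added_far := added.filter (fun n => !pvHasNear occ1 n time thr)
    if removed_far.length = removed.length ∧ added_far.length = added.length then
      [(time, removed, added)]
    else
      removed_far.map (fun n => (time, [n], ([] : List Int)))
        ++ added_far.map (fun n => (time, ([] : List Int), [n]))

theorem pv_stepA_eq (g1 g2 : PySem.Dict Int (List Int)) (allT : List Int) (thr : Int)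
    (diffs : List (Int × List Int × List Int)) (time : Int) :
    (let base_set := PySem.Set.ofList (g1.getD time [])
     let update_set := PySem.Set.ofList (g2.getD time [])
     if !(PySem.Set.equal base_set update_set) then
       let added := pvDiffList update_set base_set
       let removed := pvDiffList base_set update_set
       if !added.isEmpty || !removed.isEmpty then
         let close_matches := allT.any (fun other_time =>
           decide (time ≠ other_time) && decide (|time - other_time| ≤ thr) &&
             (!(PySem.Set.inter removed (PySem.Set.ofList (g2.getD other_time []))).isEmpty ||
              !(PySem.Set.inter added (PySem.Set.ofList (g1.getD other_time []))).isEmpty))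
         if !close_matches then
           diffs ++ [(time, removed, added)]
         else
           let d1 := removed.foldl (fun acc note =>
             if !((allT.filter (fun t => decide (|time - t| ≤ thr))).any
                   (fun t => PySem.Set.contains (PySem.Set.ofList (g2.getD t [])) note)) then
               acc ++ [(time, [note], ([] : List Int))] else acc) diffs
           added.foldl (fun acc note =>
             if !((allT.filter (fun t => decide (|time - t| ≤ thr))).any
                   (fun t => PySem.Set.contains (PySem.Set.ofList (g1.getD t [])) note)) then
               acc ++ [(time, ([] : List Int), [note])] else acc) d1
       else diffs
     else diffs)
      = diffs ++ pvChunkA g1 g2 allT thr time := by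
  simp only [pvChunkA]
  cases h1 : PySem.Set.equal (PySem.Set.ofList (g1.getD time [])) (PySem.Set.ofList (g2.getD time []))
  · simp only [Bool.not_false, if_true]
    cases h2 : (!(pvDiffList (PySem.Set.ofList (g2.getD time [])) (PySem.Set.ofList (g1.getD time []))).isEmpty ||
               !(pvDiffList (PySem.Set.ofList (g1.getD time [])) (PySem.Set.ofList (g2.getD time []))).isEmpty)
    · simp only [Bool.false_eq_true, if_false, List.append_nil]
    · simp only [if_true]
      cases h3 : allT.any (fun ot =>
          decide (time ≠ ot) && decide (|time - ot| ≤ thr) &&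
            (!(PySem.Set.inter (pvDiffList (PySem.Set.ofList (g1.getD time [])) (PySem.Set.ofList (g2.getD time []))) (PySem.Set.ofList (g2.getD ot []))).isEmpty ||
             !(PySem.Set.inter (pvDiffList (PySem.Set.ofList (g2.getD time [])) (PySem.Set.ofList (g1.getD time []))) (PySem.Set.ofList (g1.getD ot []))).isEmpty))
      · simp only [Bool.not_false, if_true]
      · simp only [Bool.not_true, Bool.false_eq_true, if_false]
        rw [PySem.List.foldl_append_if, PySem.List.foldl_append_if, List.append_assoc]
  · simp only [Bool.not_true, Bool.false_eq_true, if_false, List.append_nil]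

theorem pv_stepB_eq (g1 g2 : PySem.Dict Int (List Int)) (occ1 occ2 : PySem.Dict Int (List Int))
    (thr : Int) (diffs : List (Int × List Int × List Int)) (time : Int) :
    (let base_set := PySem.Set.ofList (g1.getD time [])
     let update_set := PySem.Set.ofList (g2.getD time [])
     let removed := pvDiffList base_set update_set
     let added := pvDiffList update_set base_set
     if removed.isEmpty && added.isEmpty then diffs
     else
       let removed_far := removed.filter (fun n => !pvHasNear occ2 n time thr)
       let added_far := added.filter (fun n => !pvHasNear occ1 n time thr)
       if removed_far.length = removed.length ∧ added_far.length = added.length then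
         diffs ++ [(time, removed, added)]
       else
         diffs ++ removed_far.map (fun n => (time, [n], ([] : List Int)))
               ++ added_far.map (fun n => (time, ([] : List Int), [n])))
      = diffs ++ pvChunkB g1 g2 occ1 occ2 thr time := by
  simp only [pvChunkB]
  split_ifs <;> simp [List.append_assoc]

theorem pv_inter_nonempty (s t : PySem.Set Int) :
    (PySem.Set.inter s t).isEmpty = false ↔ ∃ x ∈ s, x ∈ t := by
  rw [List.isEmpty_eq_false_iff_exists_mem]
  simp [PySem.Set.mem_inter]

-- (5) membership / emptiness of the ordered difference
theorem pv_mem_pvOrder (s : List Int) (tab : List (Option Int)) (x : Int) :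
    x ∈ pvOrder s tab ↔ x ∈ s := by
  unfold pvOrder
  constructor
  · intro hx
    rcases List.mem_append.1 hx with h | h
    · have := (List.mem_filter.1 h).2; simpa using this
    · exact (List.mem_filter.1 h).1
  · intro hx
    by_cases ho : x ∈ (tab.filterMap id).filter (fun y => decide (y ∈ s))
    · exact List.mem_append.2 (Or.inl ho)
    · exact List.mem_append.2 (Or.inr (List.mem_filter.2 ⟨hx, decide_eq_true ho⟩))

theorem pv_mem_pvDiffList (a b : PySem.Set Int) (x : Int) :
    x ∈ pvDiffList a b ↔ x ∈ a ∧ x ∉ b := by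
  unfold pvDiffList
  rw [pv_mem_pvOrder]
  exact PySem.Set.mem_diff a b x

theorem pv_pvDiffList_nil (a b : PySem.Set Int) :
    pvDiffList a b = [] ↔ ∀ x ∈ a, x ∈ b := by
  rw [List.eq_nil_iff_forall_not_mem]
  constructor
  · intro h x hxa
    by_contra hxb
    exact h x ((pv_mem_pvDiffList a b x).2 ⟨hxa, hxb⟩)
  · intro h x hx
    obtain ⟨hxa, hxb⟩ := (pv_mem_pvDiffList a b x).1 hx
    exact hxb (h x hxa)

theorem pv_chunk_eq (g1 g2 : PySem.Dict Int (List Int)) (occ1 occ2 : PySem.Dict Int (List Int))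
    (allT : List Int) (thr time : Int)
    (h1 : ∀ n, pvHasNear occ1 n time thr = true ↔
      ∃ t ∈ allT, |time - t| ≤ thr ∧ n ∈ PySem.Set.ofList (g1.getD t []))
    (h2 : ∀ n, pvHasNear occ2 n time thr = true ↔
      ∃ t ∈ allT, |time - t| ≤ thr ∧ n ∈ PySem.Set.ofList (g2.getD t [])) :
    pvChunkA g1 g2 allT thr time = pvChunkB g1 g2 occ1 occ2 thr time := by
  simp only [pvChunkA, pvChunkB]
  set b := PySem.Set.ofList (g1.getD time []) with hbdef
  set u := PySem.Set.ofList (g2.getD time []) with hudef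
  set removed := pvDiffList b u with hremdef
  set added := pvDiffList u b with hadddef
  by_cases heq : PySem.Set.equal b u = true
  · have hr : removed = [] := (pv_pvDiffList_nil b u).2 (fun x hx => ((PySem.Set.equal_iff b u).1 heq x).1 hx)
    have ha : added = [] := (pv_pvDiffList_nil u b).2 (fun x hx => ((PySem.Set.equal_iff b u).1 heq x).2 hx)
    simp [heq, hr, ha]
  · have heq' : PySem.Set.equal b u = false := Bool.eq_false_iff.2 heq
    have hne : ¬(removed = [] ∧ added = []) := by
      rintro ⟨h1', h2'⟩
      apply heq
      rw [PySem.Set.equal_iff]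
      intro x
      constructor
      · intro hx
        by_contra hxu
        have : x ∈ removed := (pv_mem_pvDiffList b u x).2 ⟨hx, hxu⟩
        rw [h1'] at this
        cases this
      · intro hx
        by_contra hxb
        have : x ∈ added := (pv_mem_pvDiffList u b x).2 ⟨hx, hxb⟩
        rw [h2'] at this
        cases this
    have hskipB : (removed.isEmpty && added.isEmpty) = false := by
      cases hre : removed.isEmpty <;> cases hae : added.isEmpty <;> simp_all [List.isEmpty_iff]
    have hskipA : (!added.isEmpty || !removed.isEmpty) = true := by
      cases hre : removed.isEmpty <;> cases hae : added.isEmpty <;> simp_all [List.isEmpty_iff]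
    simp only [heq', Bool.not_false, if_true, hskipA, hskipB, Bool.false_eq_true, if_false]
    -- A's per-note window scan IS B's binary-search query
    have hfar2 : ∀ note : Int,
        (!((allT.filter (fun t => decide (|time - t| ≤ thr))).any
            (fun t => PySem.Set.contains (PySem.Set.ofList (g2.getD t [])) note)))
          = (!pvHasNear occ2 note time thr) := by
      intro note
      congr 1
      rw [Bool.eq_iff_iff, List.any_eq_true, h2 note]
      constructor
      · rintro ⟨t, ht, hp⟩
        obtain ⟨hmem, hcond⟩ := List.mem_filter.1 ht
        exact ⟨t, hmem, of_decide_eq_true hcond, (PySem.Set.contains_iff _ _).1 hp⟩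
      · rintro ⟨t, ht, hle, hm⟩
        exact ⟨t, List.mem_filter.2 ⟨ht, decide_eq_true hle⟩, (PySem.Set.contains_iff _ _).2 hm⟩
    have hfar1 : ∀ note : Int,
        (!((allT.filter (fun t => decide (|time - t| ≤ thr))).any
            (fun t => PySem.Set.contains (PySem.Set.ofList (g1.getD t [])) note)))
          = (!pvHasNear occ1 note time thr) := by
      intro note
      congr 1
      rw [Bool.eq_iff_iff, List.any_eq_true, h1 note]
      constructor
      · rintro ⟨t, ht, hp⟩
        obtain ⟨hmem, hcond⟩ := List.mem_filter.1 ht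
        exact ⟨t, hmem, of_decide_eq_true hcond, (PySem.Set.contains_iff _ _).1 hp⟩
      · rintro ⟨t, ht, hle, hm⟩
        exact ⟨t, List.mem_filter.2 ⟨ht, decide_eq_true hle⟩, (PySem.Set.contains_iff _ _).2 hm⟩
    rw [List.filter_congr (fun x _ => hfar2 x), List.filter_congr (fun x _ => hfar1 x)]
    -- close_matches ↔ some removed/added note has a match within the threshold
    have hclose_iff : (allT.any (fun ot =>
          decide (time ≠ ot) && decide (|time - ot| ≤ thr) &&
            (!(PySem.Set.inter removed (PySem.Set.ofList (g2.getD ot []))).isEmpty ||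
             !(PySem.Set.inter added (PySem.Set.ofList (g1.getD ot []))).isEmpty)) = true)
        ↔ ((∃ x ∈ removed, pvHasNear occ2 x time thr = true) ∨
           (∃ x ∈ added, pvHasNear occ1 x time thr = true)) := by
      rw [List.any_eq_true]
      constructor
      · rintro ⟨ot, hot, hpred⟩
        rw [Bool.and_eq_true, Bool.and_eq_true, Bool.or_eq_true] at hpred
        obtain ⟨⟨_, hle⟩, hor⟩ := hpred
        rw [decide_eq_true_eq] at hle
        rcases hor with h | h
        · rw [Bool.not_eq_true', pv_inter_nonempty] at h
          obtain ⟨x, hxr, hxm⟩ := h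
          exact Or.inl ⟨x, hxr, (h2 x).2 ⟨ot, hot, hle, hxm⟩⟩
        · rw [Bool.not_eq_true', pv_inter_nonempty] at h
          obtain ⟨x, hxa, hxm⟩ := h
          exact Or.inr ⟨x, hxa, (h1 x).2 ⟨ot, hot, hle, hxm⟩⟩
      · rintro (⟨x, hxr, hxn⟩ | ⟨x, hxa, hxn⟩)
        · obtain ⟨t, ht, hle, hxm⟩ := (h2 x).1 hxn
          refine ⟨t, ht, ?_⟩
          rw [Bool.and_eq_true, Bool.and_eq_true, Bool.or_eq_true]
          refine ⟨⟨decide_eq_true ?_, decide_eq_true hle⟩, Or.inl ?_⟩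
          · intro e
            rw [← e] at hxm
            exact ((pv_mem_pvDiffList b u x).1 hxr).2 hxm
          · rw [Bool.not_eq_true', pv_inter_nonempty]
            exact ⟨x, hxr, hxm⟩
        · obtain ⟨t, ht, hle, hxm⟩ := (h1 x).1 hxn
          refine ⟨t, ht, ?_⟩
          rw [Bool.and_eq_true, Bool.and_eq_true, Bool.or_eq_true]
          refine ⟨⟨decide_eq_true ?_, decide_eq_true hle⟩, Or.inr ?_⟩
          · intro e
            rw [← e] at hxm
            exact ((pv_mem_pvDiffList u b x).1 hxa).2 hxm
          · rw [Bool.not_eq_true', pv_inter_nonempty]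
            exact ⟨x, hxa, hxm⟩
    -- "no close match" ↔ the far filters keep everything
    have hlen_iff : ((removed.filter (fun n => !pvHasNear occ2 n time thr)).length = removed.length ∧
          (added.filter (fun n => !pvHasNear occ1 n time thr)).length = added.length)
        ↔ ¬((∃ x ∈ removed, pvHasNear occ2 x time thr = true) ∨
            (∃ x ∈ added, pvHasNear occ1 x time thr = true)) := by
      rw [List.length_filter_eq_length_iff, List.length_filter_eq_length_iff]
      push Not
      constructor
      · rintro ⟨ha', hb'⟩
        refine ⟨fun x hx => ?_, fun x hx => ?_⟩
        · simpa using ha' x hx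
        · simpa using hb' x hx
      · rintro ⟨ha', hb'⟩
        refine ⟨fun x hx => ?_, fun x hx => ?_⟩
        · simpa using ha' x hx
        · simpa using hb' x hx
    cases hcm : allT.any (fun ot =>
          decide (time ≠ ot) && decide (|time - ot| ≤ thr) &&
            (!(PySem.Set.inter removed (PySem.Set.ofList (g2.getD ot []))).isEmpty ||
             !(PySem.Set.inter added (PySem.Set.ofList (g1.getD ot []))).isEmpty))
    · have hprop : ¬((∃ x ∈ removed, pvHasNear occ2 x time thr = true) ∨
            (∃ x ∈ added, pvHasNear occ1 x time thr = true)) := by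
        intro hcp
        rw [← hclose_iff] at hcp
        rw [hcm] at hcp
        cases hcp
      rw [if_pos (hlen_iff.2 hprop)]
      simp
    · have hprop := hclose_iff.1 hcm
      rw [if_neg (fun hcp => (hlen_iff.1 hcp) hprop)]
      simp

-- ===== VERDICT (by name: the statement is the Claim_ definition above) =====
theorem compare_tracks_spec : Claim_equal_compare_tracks := by
  intro t1 t2 w thr _
  unfold Spec_compare_tracks
  show compare_tracks t1 t2 w thr = compare_tracks_alt t1 t2 w thr
  simp only [compare_tracks, compare_tracks_alt, pvGroupB_eq]
  set g1 := pvGroup (PySem.Dict.ofList t1) w with hg1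
  set g2 := pvGroup (PySem.Dict.ofList t2) w with hg2
  set allT := PySem.List.sorted
      (PySem.Set.union (PySem.Set.ofList (PySem.Dict.keys g1)) (PySem.Dict.keys g2))
      (fun t => t) false with hallT
  rw [pv_occ_pair_split]
  set occ1 := allT.foldl (pvOccStep g1) PySem.Dict.empty with hocc1
  set occ2 := allT.foldl (pvOccStep g2) PySem.Dict.empty with hocc2
  -- all_times is strictly increasing
  have hnodup : allT.Nodup := by
    have hu : (PySem.Set.union (PySem.Set.ofList (PySem.Dict.keys g1)) (PySem.Dict.keys g2)).Nodup :=
      PySem.Set.nodup_union _ _ (PySem.Set.nodup_ofList _)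
    exact (PySem.List.sorted_perm _ _ _).nodup_iff.2 hu
  have hple : allT.Pairwise (· ≤ ·) := PySem.List.sorted_pairwise _ _
  have hplt : allT.Pairwise (· < ·) :=
    List.sortedLT_iff_pairwise.mp
      (List.SortedLE.sortedLT_of_nodup (List.sortedLE_iff_pairwise.mpr hple) hnodup)
  have hnear : ∀ (g : PySem.Dict Int (List Int)) (occ : PySem.Dict Int (List Int)),
      occ = allT.foldl (pvOccStep g) PySem.Dict.empty →
      ∀ n time', pvHasNear occ n time' thr = true ↔
        ∃ t ∈ allT, |time' - t| ≤ thr ∧ n ∈ PySem.Set.ofList (g.getD t []) := by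
    intro g occ hocc n time'
    have hc : occ.getD n [] = allT.filter (fun t => (PySem.Set.ofList (g.getD t [])).contains n) := by
      rw [hocc, pv_occ_getD]
      simp
    have hsf : (occ.getD n []).Pairwise (· ≤ ·) := by
      rw [hc]; exact List.Pairwise.filter _ hple
    rw [pv_hasNear_iff occ n time' thr hsf, hc]
    constructor
    · rintro ⟨t, ht, hb1, hb2⟩
      obtain ⟨hmem, hcont⟩ := List.mem_filter.1 ht
      refine ⟨t, hmem, ?_, (PySem.Set.contains_iff _ _).1 hcont⟩
      rw [abs_le]; omega
    · rintro ⟨t, ht, habs, hmem⟩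
      rw [abs_le] at habs
      exact ⟨t, List.mem_filter.2 ⟨ht, (PySem.Set.contains_iff _ _).2 hmem⟩, by omega, by omega⟩
  trans (allT.flatMap (fun time => pvChunkA g1 g2 allT thr time))
  · refine Eq.trans (PySem.List.foldl_congr_mem _ _
      (fun acc time => acc ++ pvChunkA g1 g2 allT thr time) _
      (fun acc x _ => pv_stepA_eq g1 g2 allT thr acc x)) ?_
    rw [PySem.List.foldl_append_eq_flatMap, List.nil_append]
  trans (allT.flatMap (fun time => pvChunkB g1 g2 occ1 occ2 thr time))
  · exact List.flatMap_congr (fun x _ =>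
      pv_chunk_eq g1 g2 occ1 occ2 allT thr x (hnear g1 occ1 hocc1 · x) (hnear g2 occ2 hocc2 · x))
  · refine Eq.symm (Eq.trans (PySem.List.foldl_congr_mem _ _
      (fun acc time => acc ++ pvChunkB g1 g2 occ1 occ2 thr time) _
      (fun acc x _ => pv_stepB_eq g1 g2 occ1 occ2 thr acc x)) ?_)
    rw [PySem.List.foldl_append_eq_flatMap, List.nil_append]
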